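-- pv_equiv track=rewrite | github.com/Architolb/hw-week2 | whiteboard-prac.py | punctuation
-- ===== SOURCE A (Python) =====
-- def punctuation(sentence):
--     x = ' '
--     for letters in sentence:
--         if letters == 'y':
--             x = x + 'y!'
--         elif letters == 's':
--             x = x + 's'
--         elif letters == 'w':
--             x = x + 'w'
--         elif letters == 'g':
--             x = x + 'G'
--         else:
--             x = x + letters
--     return x
-- ===== SOURCE B (Python) =====
-- def punctuation(sentence):
--     return ' ' + sentence.replace('y', 'y!').replace('g', 'G')
-- ===== Notes on version B (the rewrite author's own statement) =====
-- stated objective: idiomatic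
-- what changed: Replaced the character-by-character accumulation loop with a prepended space plus two whole-string replace passes (y->y!, g->G); the remaining branches of A map a character to itself and disappear.
import Mathlib
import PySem

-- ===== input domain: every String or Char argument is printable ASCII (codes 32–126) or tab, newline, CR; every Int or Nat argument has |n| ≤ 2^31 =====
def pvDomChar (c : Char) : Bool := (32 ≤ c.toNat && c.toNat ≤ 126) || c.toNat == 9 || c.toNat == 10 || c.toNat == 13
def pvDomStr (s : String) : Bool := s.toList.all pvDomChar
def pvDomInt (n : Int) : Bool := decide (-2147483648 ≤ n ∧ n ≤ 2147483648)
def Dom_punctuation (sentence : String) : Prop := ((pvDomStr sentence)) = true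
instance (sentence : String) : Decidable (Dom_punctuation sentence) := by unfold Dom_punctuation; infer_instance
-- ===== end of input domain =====

-- B replaces A's character-by-character accumulation loop with a prepended space plus two
-- whole-string replace passes ('y'->'y!', 'g'->'G'); A's 's'/'w' branches are identities. Objective: idiomatic.


-- ===== PORT A =====
-- x = ' '; for letters in sentence: append per branch (strings as lists of chars).
def punctuation (sentence : String) : String :=
  String.mk (sentence.toList.foldl (fun x letters =>
    if letters = 'y' then x ++ ['y', '!']
    else if letters = 's' then x ++ ['s']
    else if letters = 'w' then x ++ ['w']
    else if letters = 'g' then x ++ ['G']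
    else x ++ [letters]) [' '])

-- ===== PORT B =====
-- return ' ' + sentence.replace('y', 'y!').replace('g', 'G')
def punctuation_alt (sentence : String) : String :=
  String.mk (' ' ::
    (PySem.Chars.replace (PySem.Chars.replace sentence.toList ['y'] ['y', '!']) ['g'] ['G']))

-- ===== PRECONDITION & SPEC =====
def Spec_punctuation (sentence : String) (out : String) : Prop := out = punctuation_alt sentence
instance (sentence : String) (out : String) : Decidable (Spec_punctuation sentence out) := by unfold Spec_punctuation; infer_instance

-- ===== CLAIM (what is proved, stated in full; the proofs are below) =====
def Claim_equal_punctuation : Prop := ∀ (sentence : String), Dom_punctuation sentence → Spec_punctuation sentence (punctuation sentence)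

-- ===== LEMMAS AND PROOFS =====

-- str.replace with a one-character pattern is a flatMap over the characters.
theorem replace_single_go (o : Char) (new : List Char) :
    ∀ (l : List Char) (fuel : Nat) (acc : List Char), l.length ≤ fuel →
    PySem.Chars.replace.go [o] new fuel l acc
      = acc.reverse ++ l.flatMap (fun c => if c = o then new else [c]) := by
  intro l
  induction l with
  | nil => intro fuel acc h; cases fuel <;> simp [PySem.Chars.replace.go]
  | cons c t ih =>
    intro fuel acc h
    cases fuel with
    | zero => simp at h
    | succ f =>
      by_cases hc : c = o
      · subst hc
        rw [show PySem.Chars.replace.go [c] new (f+1) (c::t) acc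
            = PySem.Chars.replace.go [c] new f (List.drop 1 (c::t)) (new.reverse ++ acc) from by
          simp [PySem.Chars.replace.go, List.isPrefixOf]]
        simp [ih f _ (by simpa using h)]
      · rw [show PySem.Chars.replace.go [o] new (f+1) (c::t) acc
            = PySem.Chars.replace.go [o] new f t (c :: acc) from by
          simp [PySem.Chars.replace.go, List.isPrefixOf]; intro h; exact absurd h.symm hc]
        simp [ih f _ (by simpa using h), hc]

theorem replace_single (l : List Char) (o : Char) (new : List Char) :
    PySem.Chars.replace l [o] new = l.flatMap (fun c => if c = o then new else [c]) := by
  rw [PySem.Chars.replace]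
  simp [replace_single_go o new l l.length [] (le_refl _)]

-- ===== VERDICT (by name: the statement is the Claim_ definition above) =====
theorem punctuation_spec : Claim_equal_punctuation := by
  intro s _
  unfold Spec_punctuation punctuation punctuation_alt
  rw [replace_single, replace_single, List.flatMap_assoc]
  rw [show (fun (x : List Char) letters =>
        if letters = 'y' then x ++ ['y', '!']
        else if letters = 's' then x ++ ['s']
        else if letters = 'w' then x ++ ['w']
        else if letters = 'g' then x ++ ['G']
        else x ++ [letters])
      = (fun x letters => x ++
          (if letters = 'y' then ['y', '!']
           else if letters = 's' then ['s']
           else if letters = 'w' then ['w']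
           else if letters = 'g' then ['G']
           else [letters])) from by
    funext x c; split_ifs <;> rfl]
  rw [PySem.List.foldl_append_eq_flatMap]
  have hfun : ∀ c : Char,
      (if c = 'y' then ['y', '!']
       else if c = 's' then ['s']
       else if c = 'w' then ['w']
       else if c = 'g' then ['G']
       else [c])
      = ((fun c => if c = 'y' then ['y', '!'] else [c]) c).flatMap
          (fun c => if c = 'g' then ['G'] else [c]) := by
    intro c
    by_cases hy : c = 'y'
    · subst hy; decide
    · by_cases hg : c = 'g'
      · subst hg; decide
      · simp [hy, hg]
        split_ifs with h1 h2 <;> simp_all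
  have : s.toList.flatMap
      (fun c => if c = 'y' then ['y', '!']
       else if c = 's' then ['s']
       else if c = 'w' then ['w']
       else if c = 'g' then ['G']
       else [c])
      = s.toList.flatMap (fun c => ((fun c => if c = 'y' then ['y', '!'] else [c]) c).flatMap
          (fun c => if c = 'g' then ['G'] else [c])) := by
    simp only [hfun]
  rw [this]
  rfl
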